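-- pv_equiv track=rewrite | github.com/rpra914-nz/NZ-VISA-ADVISOR | agents/classification_agent.py | _extract_bullets
-- ===== SOURCE A (Python) =====
-- def _extract_bullets(lines: list, start_index: int) -> list:
--     """Extract bullet point lines starting from start_index until next section."""
--     items = []
--     for line in lines[start_index:]:
--         stripped = line.strip()
--         if stripped.startswith("-"):
--             clean = stripped.lstrip("- ").strip()
--             items.append(clean)
--         elif stripped == "" or stripped == "---":
--             continue
--         elif any(stripped.startswith(k) for k in [
--             "RECOMMENDED_VISA:", "POINTS_FROM_PILLAR:", "PILLAR_USED:",
--             "NZ_EXPERIENCE_POINTS:", "TOTAL_POINTS:", "THRESHOLD:",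
--             "STATUS:", "CONFIDENCE:", "STRENGTHS:", "GAPS:",
--             "RECOMMENDED_ACTIONS:", "RISK_FLAGS:", "DISCLAIMER:"
--         ]):
--             break
--     return items
-- ===== SOURCE B (Python) =====
-- _HEADER_KEYS = [
--     "RECOMMENDED_VISA:", "POINTS_FROM_PILLAR:", "PILLAR_USED:",
--     "NZ_EXPERIENCE_POINTS:", "TOTAL_POINTS:", "THRESHOLD:",
--     "STATUS:", "CONFIDENCE:", "STRENGTHS:", "GAPS:",
--     "RECOMMENDED_ACTIONS:", "RISK_FLAGS:", "DISCLAIMER:",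
-- ]
--
--
-- def _is_header(line):
--     s = line.strip()
--     return any(s.startswith(k) for k in _HEADER_KEYS)
--
--
-- def _extract_bullets(lines: list, start_index: int) -> list:
--     """Two passes: find the stop boundary (first section header), then shape
--     the bullet lines of the slice before it."""
--     tail = lines[start_index:]
--     stop = next((i for i, line in enumerate(tail) if _is_header(line)), len(tail))
--     return [line.strip().lstrip("- ").strip()
--             for line in tail[:stop]
--             if line.strip().startswith("-")]
-- ===== Notes on version B (the rewrite author's own statement) =====
-- stated objective: alternative
-- what changed: A's single fused loop (accumulate bullets, break on a header) is replaced by two separate passes: first find the stop boundary (index of the first section-header line, defaulting to the slice length), then build the result by a filter/clean comprehension over the slice before that boundary.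
import Mathlib
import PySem

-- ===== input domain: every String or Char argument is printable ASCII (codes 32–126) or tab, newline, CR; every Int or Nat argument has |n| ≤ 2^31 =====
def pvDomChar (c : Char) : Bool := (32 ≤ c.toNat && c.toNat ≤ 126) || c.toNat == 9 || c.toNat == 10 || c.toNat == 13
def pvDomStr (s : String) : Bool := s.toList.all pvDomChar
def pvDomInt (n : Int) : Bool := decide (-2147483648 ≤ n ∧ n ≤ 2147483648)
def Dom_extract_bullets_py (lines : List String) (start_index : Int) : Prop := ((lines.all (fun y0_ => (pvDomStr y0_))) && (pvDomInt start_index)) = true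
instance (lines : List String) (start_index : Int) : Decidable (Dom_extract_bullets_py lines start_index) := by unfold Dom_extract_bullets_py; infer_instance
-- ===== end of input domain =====

-- B replaces A's single fused loop (break + accumulate) by a boundary-finding pass plus a
-- separate filter/clean shaping pass over the slice before the boundary; objective: alternative.

-- ===== PORT A =====
-- the section-header keys of A's `any(... for k in [...])`
def pvHeaderKeys : List String :=
  ["RECOMMENDED_VISA:", "POINTS_FROM_PILLAR:", "PILLAR_USED:",
   "NZ_EXPERIENCE_POINTS:", "TOTAL_POINTS:", "THRESHOLD:",
   "STATUS:", "CONFIDENCE:", "STRENGTHS:", "GAPS:",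
   "RECOMMENDED_ACTIONS:", "RISK_FLAGS:", "DISCLAIMER:"]

-- hand port of str.lstrip("- "): drop leading '-' and ' ' characters (exact: lstrip with a
-- char set drops exactly the leading characters belonging to the set)
def pvLstripDashSpace (s : String) : String :=
  String.ofList (s.toList.dropWhile (fun c => c == '-' || c == ' '))

-- A's loop body, with the `for`/`break` as structural recursion building `items` front-to-back
def pvGoA : List String → List String
  | [] => []
  | l :: rest =>
    let stripped := PySem.Str.strip l
    if PySem.Str.startswith stripped "-" then
      PySem.Str.strip (pvLstripDashSpace stripped) :: pvGoA rest
    else if stripped = "" || stripped = "---" then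
      pvGoA rest
    else if pvHeaderKeys.any (fun k => PySem.Str.startswith stripped k) then
      []
    else
      pvGoA rest

def extract_bullets_py (lines : List String) (start_index : Int) : List String :=
  pvGoA (PySem.List.slice lines (some start_index) none)

-- ===== PORT B =====
def pvIsHeader (line : String) : Bool :=
  pvHeaderKeys.any (fun k => PySem.Str.startswith (PySem.Str.strip line) k)

-- B's boundary pass: `next((i for i, line in enumerate(tail) if _is_header(line)), len(tail))`
def pvFindStop : List String → Nat
  | [] => 0
  | l :: rest => if pvIsHeader l then 0 else pvFindStop rest + 1

def extract_bullets_py_alt (lines : List String) (start_index : Int) : List String :=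
  let tail := PySem.List.slice lines (some start_index) none
  let stop := pvFindStop tail
  ((tail.take stop).filter (fun l => PySem.Str.startswith (PySem.Str.strip l) "-")).map
    (fun l => PySem.Str.strip (pvLstripDashSpace (PySem.Str.strip l)))

-- ===== PRECONDITION & SPEC =====
def Spec_extract_bullets_py (lines : List String) (start_index : Int) (out : List String) : Prop := out = extract_bullets_py_alt lines start_index
instance (lines : List String) (start_index : Int) (out : List String) : Decidable (Spec_extract_bullets_py lines start_index out) := by unfold Spec_extract_bullets_py; infer_instance

-- ===== CLAIM (what is proved, stated in full; the proofs are below) =====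
def Claim_equal_extract_bullets_py : Prop := ∀ (lines : List String) (start_index : Int), Dom_extract_bullets_py lines start_index → Spec_extract_bullets_py lines start_index (extract_bullets_py lines start_index)

-- ===== LEMMAS AND PROOFS =====

-- a line whose stripped form starts with "-" starts with none of the header keys
theorem pv_bullet_not_header (l : String)
    (h : PySem.Str.startswith (PySem.Str.strip l) "-" = true) : pvIsHeader l = false := by
  simp only [PySem.Str.startswith_eq] at h
  rw [PySem.Chars.startswith_iff] at h
  obtain ⟨t, ht⟩ := h
  rw [Bool.eq_false_iff]
  intro hc
  unfold pvIsHeader pvHeaderKeys at hc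
  simp only [List.any_cons, List.any_nil, Bool.or_eq_true, PySem.Str.startswith_eq,
    PySem.Chars.startswith_iff, ← ht] at hc
  simp [List.cons_prefix_cons] at hc

-- A's fused loop equals B's boundary pass followed by the shaping pass
theorem pvGoA_eq (cs : List String) :
    pvGoA cs = ((cs.take (pvFindStop cs)).filter
        (fun l => PySem.Str.startswith (PySem.Str.strip l) "-")).map
      (fun l => PySem.Str.strip (pvLstripDashSpace (PySem.Str.strip l))) := by
  induction cs with
  | nil => rfl
  | cons l rest ih =>
    by_cases hb : PySem.Chars.startswith (PySem.Chars.strip l.toList) ['-'] = true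
    · have hh : pvIsHeader l = false := pv_bullet_not_header l (by simpa using hb)
      simp [pvGoA, pvFindStop, hb, hh, ih]
    · have hbF : PySem.Chars.startswith (PySem.Chars.strip l.toList) ['-'] = false :=
        Bool.eq_false_iff.mpr hb
      by_cases h0 : PySem.Str.strip l = "" ∨ PySem.Str.strip l = "---"
      · have hse : PySem.Str.strip l = "" := by
          rcases h0 with h0 | h0
          · exact h0
          · refine absurd ?_ hb
            rw [show PySem.Chars.strip l.toList = (PySem.Str.strip l).toList from
              (PySem.Str.toList_strip l).symm, h0]
            decide
        have hh : pvIsHeader l = false := by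
          unfold pvIsHeader
          rw [hse]
          decide
        simp [pvGoA, pvFindStop, hbF, h0, hh, ih]
      · by_cases hh : ∃ x ∈ pvHeaderKeys,
            PySem.Chars.startswith (PySem.Chars.strip l.toList) x.toList = true
        · have hhB : pvIsHeader l = true := by simpa [pvIsHeader] using hh
          simp [pvGoA, pvFindStop, hbF, h0, hh, hhB]
        · have hhB : pvIsHeader l = false := by simpa [pvIsHeader] using hh
          simp [pvGoA, pvFindStop, hbF, h0, hh, hhB, ih]

-- ===== VERDICT (by name: the statement is the Claim_ definition above) =====
theorem extract_bullets_py_spec : Claim_equal_extract_bullets_py := by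
  intro lines start_index _
  unfold Spec_extract_bullets_py extract_bullets_py extract_bullets_py_alt
  exact pvGoA_eq _
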